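-- pv_equiv track=rewrite | github.com/miliar/Code_Jam_Webscraper | solutions_python/Problem_155/3417.py | findGuests
-- ===== SOURCE A (Python) =====
-- def findGuests(inp):
-- 	max_shyness = inp[0]
-- 	shyness_array = inp[1:]
--
-- 	guests = 0
-- 	cumulated_ppl = 0
--
--
-- 	for i in range(len(shyness_array)) :
-- 		if i > cumulated_ppl :
-- 			guests += i -cumulated_ppl
-- 			cumulated_ppl = i
-- 		cumulated_ppl += int(shyness_array[i])
--
-- 	return guests
-- ===== SOURCE B (Python) =====
-- def findGuests(inp):
--     max_shyness = inp[0]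
--     shyness_array = inp[1:]
--
--     deficits = []
--     prefix = 0
--     for i, s in enumerate(shyness_array):
--         deficits.append(i - prefix)
--         prefix += int(s)
--
--     return max([0] + deficits)
-- ===== Notes on version B (the rewrite author's own statement) =====
-- stated objective: simpler
-- what changed: Replaced the stateful loop that folds added guests into the cumulated total with a two-phase computation: collect the natural deficits i - prefix_sum and return the max of them and 0.
import Mathlib
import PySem

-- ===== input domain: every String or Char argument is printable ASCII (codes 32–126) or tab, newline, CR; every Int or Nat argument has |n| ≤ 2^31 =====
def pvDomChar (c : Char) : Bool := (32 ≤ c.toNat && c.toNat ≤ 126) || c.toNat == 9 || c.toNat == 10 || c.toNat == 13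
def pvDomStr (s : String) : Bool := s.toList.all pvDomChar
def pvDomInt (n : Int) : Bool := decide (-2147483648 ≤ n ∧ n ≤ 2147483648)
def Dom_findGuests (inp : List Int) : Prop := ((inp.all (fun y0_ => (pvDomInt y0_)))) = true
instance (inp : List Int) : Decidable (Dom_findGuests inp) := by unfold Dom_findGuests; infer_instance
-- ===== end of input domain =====

-- B changes A's stateful guest-absorbing loop into "max of 0 and the natural running deficits i - pfx" (objective: simpler); same return value.

-- ===== PORT A =====
-- the for loop over range(len(shyness_array)): state (guests, cumulated_ppl), i the index
def findGuestsLoop : List Int → Int → Int → Int → Int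
  | [], _, guests, _ => guests
  | x :: xs, i, guests, cum =>
    if i > cum then findGuestsLoop xs (i + 1) (guests + (i - cum)) (i + x)
    else findGuestsLoop xs (i + 1) guests (cum + x)

def findGuests (inp : List Int) : Int :=
  match inp with
  | [] => 0  -- unreachable under Pre_: Python raises IndexError on inp[0]
  | _maxShyness :: shynessArray => findGuestsLoop shynessArray 0 0 0

-- ===== PORT B =====
-- phase 1: the list of deficits i - pfx
def findGuestsDeficits : List Int → Int → Int → List Int
  | [], _, _ => []
  | s :: xs, i, pfx => (i - pfx) :: findGuestsDeficits xs (i + 1) (pfx + s)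

def findGuests_alt (inp : List Int) : Int :=
  match inp with
  | [] => 0  -- unreachable under Pre_: Python raises IndexError on inp[0]
  | _maxShyness :: shynessArray =>
    -- phase 2: max([0] + deficits)
    (findGuestsDeficits shynessArray 0 0).foldl max 0

-- ===== PRECONDITION & SPEC =====
-- Pre_ excludes only the empty list, on which A (and B) raise IndexError at inp[0].
def Pre_findGuests (inp : List Int) : Prop := inp ≠ []
instance (inp : List Int) : Decidable (Pre_findGuests inp) := by unfold Pre_findGuests; infer_instance
def pvWitness_findGuests : List Int := [4, 1, 0, 1]

def Spec_findGuests (inp : List Int) (out : Int) : Prop := out = findGuests_alt inp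
instance (inp : List Int) (out : Int) : Decidable (Spec_findGuests inp out) := by unfold Spec_findGuests; infer_instance

-- ===== CLAIM =====
def Claim_equal_findGuests : Prop := ∀ (inp : List Int), Dom_findGuests inp → Pre_findGuests inp → Spec_findGuests inp (findGuests inp)

-- ===== LEMMAS AND PROOFS =====
-- Invariant: A's cumulated_ppl always equals guests + (natural pfx sum), and A's loop
-- computes the running max of the deficits.
theorem findGuestsLoop_eq_max (xs : List Int) : ∀ (i g p : Int),
    findGuestsLoop xs i g (g + p) = (findGuestsDeficits xs i p).foldl max g := by
  induction xs with
  | nil => intro i g p; simp [findGuestsLoop, findGuestsDeficits]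
  | cons x xs ih =>
    intro i g p
    simp only [findGuestsLoop, findGuestsDeficits, List.foldl]
    by_cases h : i > g + p
    · simp only [if_pos h]
      have hmax : max g (i - p) = i - p := by omega
      have hg : g + (i - (g + p)) = i - p := by ring
      have harg : i + x = (i - p) + (p + x) := by ring
      rw [hmax, hg, harg, ih]
    · simp only [if_neg h]
      have hmax : max g (i - p) = g := by omega
      have harg : g + p + x = g + (p + x) := by ring
      rw [hmax, harg, ih]

-- ===== VERDICT =====
theorem findGuests_spec : Claim_equal_findGuests := by
  intro inp _ hpre
  unfold Spec_findGuests findGuests findGuests_alt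
  match inp with
  | [] => exact absurd rfl hpre
  | _ :: rest =>
    simpa using findGuestsLoop_eq_max rest 0 0 0
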